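-- pv_equiv track=rewrite | github.com/LLLin000/PaperForge | paperforge/worker/base_views.py | _inject_widths_into_block
-- ===== SOURCE A (Python) =====
-- def _inject_widths_into_block(text: str, widths: dict[str, int]) -> str:
--     """Inject widths: section into a fresh PF view block after the name: line.
--
--     Args:
--         text: Fresh PF view block text (with PF prefix marker).
--         widths: Column width mapping to inject.
--
--     Returns:
--         Block text with widths section inserted between name: and order:.
--     """
--     lines = text.split("\n")
--     result = []
--     injected = False
--     for line in lines:
--         result.append(line)
--         if not injected and line.strip().startswith("name:"):
--             result.append("    widths:")
--             for col, w in sorted(widths.items()):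
--                 result.append(f"      {col}: {w}")
--             injected = True
--     return "\n".join(result)
-- ===== SOURCE B (Python) =====
-- def _inject_widths_into_block(text: str, widths: dict[str, int]) -> str:
--     """Recursively partition the raw text at newlines; rebuild by concatenation,
--     splicing the precomputed widths block right after the first name: line."""
--     block = "    widths:" + "".join(f"\n      {c}: {w}" for c, w in sorted(widths.items()))
--
--     def go(s: str) -> str:
--         head, sep, tail = s.partition("\n")
--         if head.strip().startswith("name:"):
--             return head + "\n" + block + sep + tail
--         if not sep:
--             return s
--         return head + sep + go(tail)
--
--     return go(text)
-- ===== Notes on version B (the rewrite author's own statement) =====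
-- stated objective: alternative
-- what changed: B never builds a line list: it recursively partitions the raw text at each newline (str.partition), rebuilding by concatenation and splicing the precomputed widths block right after the first name: line, instead of A's split-into-lines streaming pass carrying an 'injected' flag with a nested append loop.
import Mathlib
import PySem

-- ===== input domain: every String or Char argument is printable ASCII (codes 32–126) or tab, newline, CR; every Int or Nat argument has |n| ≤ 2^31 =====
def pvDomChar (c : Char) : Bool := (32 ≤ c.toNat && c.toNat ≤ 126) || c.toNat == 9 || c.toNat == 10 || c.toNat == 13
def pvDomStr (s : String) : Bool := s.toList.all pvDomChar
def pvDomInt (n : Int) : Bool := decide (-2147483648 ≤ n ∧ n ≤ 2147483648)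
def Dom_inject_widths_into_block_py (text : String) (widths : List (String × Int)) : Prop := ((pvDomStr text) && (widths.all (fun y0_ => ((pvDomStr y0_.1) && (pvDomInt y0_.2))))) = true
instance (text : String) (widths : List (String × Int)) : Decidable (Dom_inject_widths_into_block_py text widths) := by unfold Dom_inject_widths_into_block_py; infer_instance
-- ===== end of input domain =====

-- B recursively partitions the raw text at "\n" (str.partition-style, no line list and
-- no injected flag) and rebuilds by concatenation; objective: alternative decomposition.

-- ===== PORT A =====
-- f"      {col}: {w}"
def pvFmtWidth (p : String × Int) : String := "      " ++ p.1 ++ ": " ++ PySem.Int.toStr p.2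

-- literal port of A: one pass appending each line, with an `injected` flag and a
-- nested loop appending each sorted width line after the first "name:" line.
def inject_widths_into_block_py (text : String) (widths : List (String × Int)) : String :=
  let lines := (PySem.Str.split? text "\n").getD []
  let step := fun (st : List String × Bool) (line : String) =>
    let result := st.1 ++ [line]
    if !st.2 && PySem.Str.startswith (PySem.Str.strip line) "name:" then
      ((PySem.List.sorted2 (PySem.Dict.ofList widths).items (fun p => p.1) (fun p => p.2)).foldl
        (fun r p => r ++ [pvFmtWidth p]) (result ++ ["    widths:"]), true)
    else (result, st.2)
  PySem.Str.join "\n" (lines.foldl step ([], false)).1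

-- ===== PORT B =====
-- block = "    widths:" + "".join(f"\n      {c}: {w}" for c, w in sorted(widths.items()))
-- (string concatenation ported exactly on List Char)
def pvBlockChars (widths : List (String × Int)) : List Char :=
  "    widths:".toList ++
    (PySem.List.sorted2 (PySem.Dict.ofList widths).items (fun p => p.1) (fun p => p.2)).flatMap
      (fun p => '\n' :: (pvFmtWidth p).toList)

-- go(s): head, sep, tail = s.partition("\n") (exact for the single-char separator:
-- head = chars before the first '\n', sep/tail empty iff no '\n'); then B's three returns.
def pvGoB (block : List Char) (s : List Char) : List Char :=
  let head := s.takeWhile (fun c => c != '\n')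
  if PySem.Chars.startswith (PySem.Chars.strip head) "name:".toList then
    head ++ '\n' :: (block ++ s.drop head.length)
  else
    match h : s.drop head.length with
    | [] => s
    | _ :: tail => head ++ '\n' :: pvGoB block tail
termination_by s.length
decreasing_by
  have := congrArg List.length h
  simp [List.length_drop] at this
  omega

-- port of B: recursive partition of the raw text, splicing the precomputed block chars.
def inject_widths_into_block_py_alt (text : String) (widths : List (String × Int)) : String :=
  String.ofList (pvGoB (pvBlockChars widths) text.toList)

-- ===== PRECONDITION & SPEC =====
def Spec_inject_widths_into_block_py (text : String) (widths : List (String × Int)) (out : String) : Prop := out = inject_widths_into_block_py_alt text widths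
instance (text : String) (widths : List (String × Int)) (out : String) : Decidable (Spec_inject_widths_into_block_py text widths out) := by unfold Spec_inject_widths_into_block_py; infer_instance

-- ===== CLAIM (what is proved, stated in full; the proofs are below) =====
def Claim_equal_inject_widths_into_block_py : Prop := ∀ (text : String) (widths : List (String × Int)), Dom_inject_widths_into_block_py text widths → Spec_inject_widths_into_block_py text widths (inject_widths_into_block_py text widths)

-- ===== LEMMAS AND PROOFS =====

-- A's inner loop over the sorted items just appends the mapped width lines
theorem pv_foldl_fmt (xs : List (String × Int)) (acc : List String) :
    xs.foldl (fun r p => r ++ [pvFmtWidth p]) acc = acc ++ xs.map pvFmtWidth := by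
  induction xs generalizing acc with
  | nil => simp
  | cons x xs ih => simp [List.foldl_cons, ih]

-- A's loop body, abstracted over the line predicate and the injected block
def pvStep (p : String → Bool) (block : List String) (st : List String × Bool) (line : String) :
    List String × Bool :=
  let result := st.1 ++ [line]
  if !st.2 && p line then (result ++ block, true) else (result, st.2)

-- once injected, the flag stays true and A only appends the remaining lines
theorem pv_foldl_done (p : String → Bool) (block lines acc : List String) :
    lines.foldl (pvStep p block) (acc, true) = (acc ++ lines, true) := by
  induction lines generalizing acc with
  | nil => simp
  | cons l ls ih => simp [List.foldl_cons, pvStep, ih]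

-- characterisation of A's whole loop: splice the block after the first match, if any
theorem pv_foldl_main (p : String → Bool) (block : List String) (lines acc : List String) :
    (lines.foldl (pvStep p block) (acc, false)).1 =
      match lines.findIdx? p with
      | none => acc ++ lines
      | some i => acc ++ (lines.take (i + 1) ++ block ++ lines.drop (i + 1)) := by
  induction lines generalizing acc with
  | nil => simp
  | cons l ls ih =>
    by_cases h : p l
    · simp [List.foldl_cons, pvStep, h, List.findIdx?_cons, pv_foldl_done]
    · rw [List.foldl_cons, show pvStep p block (acc, false) l = (acc ++ [l], false) by
        simp [pvStep, h], ih]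
      cases hf : ls.findIdx? p with
      | none => simp [List.findIdx?_cons, h, hf]
      | some i => simp [List.findIdx?_cons, h, hf, List.take_succ_cons, List.drop_succ_cons]

-- the lines of cs (with an accumulated reversed current line), as splitOn "\n" computes them
def pvLines : List Char → List Char → List (List Char)
  | [], cur => [cur.reverse]
  | c :: rest, cur => if c = '\n' then cur.reverse :: pvLines rest [] else pvLines rest (c :: cur)

theorem pv_go_spec (fuel : Nat) (l cur : List Char) (acc : List (List Char))
    (h : l.length ≤ fuel) :
    PySem.Chars.splitOn.go ['\n'] fuel l cur acc = acc.reverse ++ pvLines l cur := by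
  induction fuel generalizing l cur acc with
  | zero =>
    interval_cases hl : l.length
    simp only [List.length_eq_zero_iff] at hl
    subst hl
    simp [PySem.Chars.splitOn.go, pvLines]
  | succ fuel ih =>
    cases l with
    | nil => simp [PySem.Chars.splitOn.go, pvLines]
    | cons c rest =>
      simp only [List.length_cons, Nat.succ_le_succ_iff] at h
      by_cases hc : c = '\n'
      · subst hc
        rw [PySem.Chars.splitOn.go]
        rw [if_pos (by simp [List.isPrefixOf]),
          show List.drop ['\n'].length ('\n' :: rest) = rest by simp, ih rest [] _ h]
        simp [pvLines]
      · rw [PySem.Chars.splitOn.go]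
        rw [if_neg (by simp [List.isPrefixOf]; intro hh; exact hc hh.symm), ih rest (c :: cur) _ h]
        simp [pvLines, hc]

theorem pv_splitOn_eq (cs : List Char) : PySem.Chars.splitOn cs ['\n'] = pvLines cs [] := by
  rw [PySem.Chars.splitOn, pv_go_spec _ _ _ _ (Nat.le_succ _)]
  simp

theorem pv_lines_ne_nil (cs cur : List Char) : pvLines cs cur ≠ [] := by
  induction cs generalizing cur with
  | nil => simp [pvLines]
  | cons c rest ih => by_cases hc : c = '\n' <;> simp [pvLines, hc, ih]

theorem pv_join_lines (cs cur : List Char) :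
    PySem.Chars.join ['\n'] (pvLines cs cur) = cur.reverse ++ cs := by
  induction cs generalizing cur with
  | nil => simp [pvLines, PySem.Chars.join_singleton]
  | cons c rest ih =>
    by_cases hc : c = '\n'
    · subst hc
      rw [show pvLines ('\n' :: rest) cur = cur.reverse :: pvLines rest [] by simp [pvLines]]
      cases hb : pvLines rest [] with
      | nil => exact absurd hb (pv_lines_ne_nil rest [])
      | cons b bs =>
        rw [PySem.Chars.join_cons_cons, ← hb, ih]
        simp
    · rw [show pvLines (c :: rest) cur = pvLines rest (c :: cur) by simp [pvLines, hc], ih]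
      simp

-- head-form unfolding of pvLines, matching pvGoB's decomposition
theorem pv_lines_head (cs cur : List Char) :
    pvLines cs cur = (cur.reverse ++ cs.takeWhile (fun c => c != '\n')) ::
      (match cs.drop (cs.takeWhile (fun c => c != '\n')).length with
       | [] => []
       | _ :: tail => pvLines tail []) := by
  induction cs generalizing cur with
  | nil => simp [pvLines]
  | cons c rest ih =>
    by_cases hc : c = '\n'
    · subst hc
      simp [pvLines]
    · simp only [pvLines, if_false, List.takeWhile_cons, hc, bne_iff_ne, ne_eq,
        not_false_eq_true, if_pos]
      rw [ih (c :: cur)]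
      simp [List.drop_succ_cons]

theorem pv_join_append (xs ys : List (List Char)) (hx : xs ≠ []) (hy : ys ≠ []) :
    PySem.Chars.join ['\n'] (xs ++ ys) =
      PySem.Chars.join ['\n'] xs ++ '\n' :: PySem.Chars.join ['\n'] ys := by
  induction xs with
  | nil => exact absurd rfl hx
  | cons a xs ih =>
    cases xs with
    | nil =>
      cases ys with
      | nil => exact absurd rfl hy
      | cons y ys =>
        rw [List.singleton_append, PySem.Chars.join_cons_cons, PySem.Chars.join_singleton]
        simp
    | cons b xs' =>
      simp only [List.cons_append]
      conv_lhs => rw [PySem.Chars.join_cons_cons]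
      rw [show b :: (xs' ++ ys) = b :: xs' ++ ys from rfl, ih (by simp)]
      conv_rhs => rw [PySem.Chars.join_cons_cons]
      simp

theorem pv_takeWhile_drop (p : Char → Bool) (l : List Char) :
    l.takeWhile p ++ l.drop (l.takeWhile p).length = l := by
  induction l with
  | nil => simp
  | cons c r ih => by_cases h : p c <;> simp [h, ih]

theorem pv_drop_head_false (p : Char → Bool) (l t : List Char) (c : Char)
    (h : l.drop (l.takeWhile p).length = c :: t) : p c = false := by
  have hd : ∀ m : List Char, m.drop (m.takeWhile p).length = m.dropWhile p := by
    intro m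
    induction m with
    | nil => simp
    | cons a r ih => by_cases ha : p a <;> simp [ha, ih]
  have hd := hd l
  rw [hd] at h
  have := List.head_dropWhile_not (p := p) (l := l) (by simp [h])
  simpa [h] using this

-- main characterisation of B's recursion: it equals the join of the spliced line list
theorem pv_goB_main (block : List Char) (bl : List (List Char)) (hb : bl ≠ [])
    (hj : PySem.Chars.join ['\n'] bl = block) (cs : List Char) :
    pvGoB block cs = PySem.Chars.join ['\n']
      (match (pvLines cs []).findIdx?
          (fun l => PySem.Chars.startswith (PySem.Chars.strip l) "name:".toList) with
       | none => pvLines cs []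
       | some i => (pvLines cs []).take (i + 1) ++ bl ++ (pvLines cs []).drop (i + 1)) := by
  fun_induction pvGoB block cs with
  | case1 s head hp =>
    rw [pv_lines_head s []]
    simp only [List.reverse_nil, List.nil_append]
    rw [show List.takeWhile (fun c => c != '\n') s = head from rfl]
    rw [List.findIdx?_cons]
    simp only [hp, if_true]
    cases hrest : s.drop head.length with
    | nil =>
      rw [List.take_succ_cons, List.take_zero, List.drop_succ_cons, List.drop_zero]
      rw [show head :: [] ++ bl ++ ([] : List (List Char)) = [head] ++ bl by simp,
        pv_join_append [head] bl (by simp) hb, PySem.Chars.join_singleton, hj]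
      simp
    | cons c t =>
      have hc : c = '\n' := by
        have := pv_drop_head_false (fun c => c != '\n') s t c hrest
        simpa using this
      subst hc
      rw [List.take_succ_cons, List.take_zero, List.drop_succ_cons, List.drop_zero]
      rw [show head :: [] ++ bl ++ pvLines t [] = [head] ++ (bl ++ pvLines t []) by simp,
        pv_join_append [head] _ (by simp) (by simp [hb]),
        pv_join_append bl _ hb (pv_lines_ne_nil t []), PySem.Chars.join_singleton, hj,
        pv_join_lines t []]
      simp
  | case2 s head hp hrest =>
    rw [pv_lines_head s []]
    simp only [List.reverse_nil, List.nil_append]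
    have htw : List.takeWhile (fun c => c != '\n') s = head := rfl
    rw [htw]
    simp only [hrest]
    rw [List.findIdx?_cons]
    simp only [hp, if_false, Bool.false_eq_true, List.findIdx?_nil, Option.map_none]
    rw [PySem.Chars.join_singleton]
    conv_lhs => rw [← pv_takeWhile_drop (fun c => c != '\n') s]
    rw [htw, hrest]
    simp
  | case3 s head hp c tail hrest ih =>
    rw [pv_lines_head s []]
    simp only [List.reverse_nil, List.nil_append]
    rw [show List.takeWhile (fun c => c != '\n') s = head from rfl]
    simp only [hrest]
    rw [List.findIdx?_cons]
    simp only [hp, if_false, Bool.false_eq_true]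
    cases hf : (pvLines tail []).findIdx?
        (fun l => PySem.Chars.startswith (PySem.Chars.strip l) "name:".toList) with
    | none =>
      rw [hf] at ih
      simp only [Option.map_none]
      rw [show head :: pvLines tail [] = [head] ++ pvLines tail [] by simp,
        pv_join_append [head] _ (by simp) (pv_lines_ne_nil tail []),
        PySem.Chars.join_singleton, ← ih]
    | some i =>
      rw [hf] at ih
      simp only [Option.map_some]
      rw [List.take_succ_cons, List.drop_succ_cons]
      rw [show head :: (pvLines tail []).take (i + 1) ++ bl ++ (pvLines tail []).drop (i + 1)
          = [head] ++ ((pvLines tail []).take (i + 1) ++ bl ++ (pvLines tail []).drop (i + 1))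
          by simp,
        pv_join_append [head] _ (by simp) (by
          intro hcon
          apply hb
          rcases List.append_eq_nil_iff.mp hcon with ⟨h1, _⟩
          exact (List.append_eq_nil_iff.mp h1).2),
        PySem.Chars.join_singleton, ← ih]

-- the two predicates agree across String.ofList
theorem pv_pred_comp :
    (fun l => PySem.Str.startswith (PySem.Str.strip l) "name:") ∘ String.ofList =
      (fun l => PySem.Chars.startswith (PySem.Chars.strip l) "name:".toList) := by
  funext l
  simp [PySem.Str.startswith]

-- join with '\n' of a cons is concatenation with a flatMap of '\n'-prefixed pieces
theorem pv_join_flat (a : List Char) (ls : List (List Char)) :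
    PySem.Chars.join ['\n'] (a :: ls) = a ++ ls.flatMap (fun x => '\n' :: x) := by
  induction ls generalizing a with
  | nil => simp [PySem.Chars.join_singleton]
  | cons b ls ih => rw [PySem.Chars.join_cons_cons, ih b]; simp

-- ===== VERDICT (by name: the statement is the Claim_ definition above) =====
theorem inject_widths_into_block_py_spec : Claim_equal_inject_widths_into_block_py := by
  intro text widths _
  unfold Spec_inject_widths_into_block_py inject_widths_into_block_py inject_widths_into_block_py_alt
  set pS : String → Bool := fun l => PySem.Str.startswith (PySem.Str.strip l) "name:" with hpS
  set sorted := PySem.List.sorted2 (PySem.Dict.ofList widths).items (fun p => p.1) (fun p => p.2)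
    with hsorted
  set blockS : List String := "    widths:" :: sorted.map pvFmtWidth with hblockS
  have hstep : (fun (st : List String × Bool) (line : String) =>
      let result := st.1 ++ [line]
      if !st.2 && PySem.Str.startswith (PySem.Str.strip line) "name:" then
        (sorted.foldl (fun r q => r ++ [pvFmtWidth q]) (result ++ ["    widths:"]), true)
      else (result, st.2)) = pvStep pS blockS := by
    funext st line
    simp only [pvStep]
    rw [pv_foldl_fmt]
    simp [hpS, hblockS]
  simp only [hstep, pv_foldl_main]
  have hlines : (PySem.Str.split? text "\n").getD [] = (pvLines text.toList []).map String.ofList := by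
    simp [PySem.Str.split?, PySem.Chars.split?, pv_splitOn_eq,
      show ("\n" : String).toList = ['\n'] from rfl]
  rw [hlines]
  set bl : List (List Char) :=
    "    widths:".toList :: sorted.map (fun p => (pvFmtWidth p).toList) with hbl
  have hj : PySem.Chars.join ['\n'] bl = pvBlockChars widths := by
    rw [hbl, pv_join_flat]
    simp [pvBlockChars, List.flatMap_map, hsorted]
  refine String.toList_inj.mp ?_
  rw [show (String.ofList (pvGoB (pvBlockChars widths) text.toList)).toList
      = pvGoB (pvBlockChars widths) text.toList by simp]
  rw [pv_goB_main (pvBlockChars widths) bl (by simp [hbl]) hj text.toList]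
  rw [List.findIdx?_map, pv_pred_comp]
  cases hf : (pvLines text.toList []).findIdx?
      (fun l => PySem.Chars.startswith (PySem.Chars.strip l) "name:".toList) with
  | none =>
    simp [PySem.Str.join, Function.comp_def, PySem.Chars.join]
  | some i =>
    simp [hbl, hblockS, PySem.Str.join, Function.comp_def, List.map_take, List.map_drop,
      List.map_map, List.map_append, PySem.Chars.join]
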